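-- pv_equiv track=rewrite | github.com/PrasannaB028/bluvo_test_pod | engine/tts_whisper_align.py | align_tts_to_whisper
-- ===== SOURCE A (Python) =====
-- def normalize(text):
--     return (
--         text.upper()
--         .replace(",", "")
--         .replace(".", "")
--         .replace("?", "")
--         .replace("-", " ")
--         .replace("|", " ")
--         .replace("+", " ")
--         .replace("—", " ")
--         .strip()
--     )
--
-- def tokenize(text):
--     return normalize(text).split()
--
-- def align_tts_to_whisper(tts_script, whisper_words):
--     """
--     Build mapping:
--     TTS word index → Whisper word index
--     """
--     tts_words = tokenize(tts_script)
--     whisper_stream = [w["word"] for w in whisper_words]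
--
--     mapping = {}
--     wi = 0
--
--     for ti, tw in enumerate(tts_words):
--         while wi < len(whisper_stream):
--             if whisper_stream[wi] == tw:
--                 mapping[ti] = wi
--                 wi += 1
--                 break
--             wi += 1
--
--     return tts_words, mapping
-- ===== SOURCE B (Python) =====
-- def normalize(text):
--     return (
--         text.upper()
--         .replace(",", "")
--         .replace(".", "")
--         .replace("?", "")
--         .replace("-", " ")
--         .replace("|", " ")
--         .replace("+", " ")
--         .replace("—", " ")
--         .strip()
--     )
--
-- def tokenize(text):
--     return normalize(text).split()
--
-- def bisect_left(lst, x):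
--     lo, hi = 0, len(lst)
--     while lo < hi:
--         mid = (lo + hi) // 2
--         if lst[mid] < x:
--             lo = mid + 1
--         else:
--             hi = mid
--     return lo
--
-- def align_tts_to_whisper(tts_script, whisper_words):
--     """
--     Build mapping: TTS word index -> Whisper word index,
--     via an inverted index (word -> ascending list of its whisper indices)
--     resolved with binary search against a monotone cursor.
--     """
--     tts_words = tokenize(tts_script)
--     positions = {}
--     for wi, w in enumerate(whisper_words):
--         word = w["word"]
--         positions[word] = positions.get(word, []) + [wi]
--     mapping = {}
--     wi = 0
--     for ti, tw in enumerate(tts_words):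
--         lst = positions.get(tw, [])
--         k = bisect_left(lst, wi)
--         if k == len(lst):
--             break
--         mapping[ti] = lst[k]
--         wi = lst[k] + 1
--     return tts_words, mapping
-- ===== Notes on version B (the rewrite author's own statement) =====
-- stated objective: alternative
-- what changed: B replaces A's per-TTS-word forward rescan of the whisper stream by two staged passes: it first builds an inverted index (whisper word -> ascending list of its indices), then resolves each TTS word by binary-searching that word's occurrence list for the first index at or past a monotone cursor, breaking when none exists (which is exactly when A's cursor hits the stream end).
import Mathlib
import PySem

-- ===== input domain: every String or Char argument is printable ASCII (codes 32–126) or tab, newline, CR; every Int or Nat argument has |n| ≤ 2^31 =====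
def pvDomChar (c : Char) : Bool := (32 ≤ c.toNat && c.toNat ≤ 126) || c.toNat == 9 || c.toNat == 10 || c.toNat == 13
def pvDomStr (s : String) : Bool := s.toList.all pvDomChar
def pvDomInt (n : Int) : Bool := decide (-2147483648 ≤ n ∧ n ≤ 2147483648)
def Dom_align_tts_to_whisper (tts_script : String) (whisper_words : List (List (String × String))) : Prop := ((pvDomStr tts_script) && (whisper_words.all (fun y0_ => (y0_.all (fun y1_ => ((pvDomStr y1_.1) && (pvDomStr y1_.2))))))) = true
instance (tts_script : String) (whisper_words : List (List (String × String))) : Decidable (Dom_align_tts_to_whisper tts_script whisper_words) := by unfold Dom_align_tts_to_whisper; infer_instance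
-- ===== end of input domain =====

-- B's change: A resolves each TTS word by a forward rescan of the whisper stream from a
-- cursor; B first builds an inverted index (whisper word -> ascending list of its indices)
-- and then binary-searches each TTS word's occurrence list for the first index past the
-- cursor, breaking when none exists. Equivalence is for the return value;
-- Pre_ excludes whisper entries lacking key "word" (KeyError in both Pythons).

-- ===== PORT A =====
-- shared helpers: both Pythons contain identical normalize/tokenize
def pvNormalize (s : String) : String :=
  PySem.Str.strip (PySem.Str.replace (PySem.Str.replace (PySem.Str.replace (PySem.Str.replace
    (PySem.Str.replace (PySem.Str.replace (PySem.Str.replace (PySem.Str.upper s)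
      "," "") "." "") "?" "") "-" " ") "|" " ") "+" " ") "—" " ")

def pvTokenize (s : String) : List String := PySem.Str.split₀ (pvNormalize s)

-- w["word"]: first-match dict lookup; the default "" is never reached inside Pre_ (KeyError excluded there)
def pvWordOf (w : List (String × String)) : String := ((PySem.Dict.mk w).get? "word").getD ""

-- A's inner "while wi < len(whisper_stream): …" : returns (new wi, matched index if any)
def pvScanA (stream : List String) (tw : String) (wi : Nat) : Nat × Option Nat :=
  if h : wi < stream.length then
    if stream[wi] == tw then (wi + 1, some wi) else pvScanA stream tw (wi + 1)
  else (wi, none)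
termination_by stream.length - wi

-- A's outer "for ti, tw in enumerate(tts_words)" with the dict built up in insertion order
def pvOuterA (stream : List String) : List String → Nat → Nat → List (Int × Int)
  | [], _, _ => []
  | tw :: more, ti, wi =>
    match pvScanA stream tw wi with
    | (wi', some j) => ((ti : Int), (j : Int)) :: pvOuterA stream more (ti + 1) wi'
    | (wi', none) => pvOuterA stream more (ti + 1) wi'

def align_tts_to_whisper (tts_script : String) (whisper_words : List (List (String × String))) : List String × (List (Int × Int)) :=
  let tts_words := pvTokenize tts_script
  let whisper_stream := whisper_words.map pvWordOf
  (tts_words, pvOuterA whisper_stream tts_words 0 0)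

-- ===== PORT B =====
-- Source B's hand-written bisect_left (lo/hi halving loop); lst[mid] is in range whenever
-- hi ≤ len(lst) as at every call site, so the getD default 0 is never read
def pvBisect (lst : List Int) (x : Int) (lo hi : Nat) : Nat :=
  if _h : lo < hi then
    let mid := (lo + hi) / 2
    if lst.getD mid 0 < x then pvBisect lst x (mid + 1) hi else pvBisect lst x lo mid
  else lo
termination_by hi - lo
decreasing_by all_goals omega

-- B's first pass: positions[word] = positions.get(word, []) + [wi] over enumerate(whisper_words)
def pvPositions (whisper_words : List (List (String × String))) : PySem.Dict String (List Int) :=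
  (PySem.List.enumerate whisper_words 0).foldl
    (fun d p => d.modify (pvWordOf p.2) [] (· ++ [p.1])) PySem.Dict.empty

-- B's second pass: for ti, tw in enumerate(tts_words), bisect the occurrence list, break on miss
def pvLoopB (pos : PySem.Dict String (List Int)) : List String → Int → Int → List (Int × Int)
  | [], _, _ => []
  | tw :: more, ti, wi =>
    let lst := pos.getD tw []
    let k := pvBisect lst wi 0 lst.length
    match lst[k]? with
    | some idx => (ti, idx) :: pvLoopB pos more (ti + 1) (idx + 1)
    | none => []

def align_tts_to_whisper_alt (tts_script : String) (whisper_words : List (List (String × String))) : List String × (List (Int × Int)) :=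
  let tts_words := pvTokenize tts_script
  (tts_words, pvLoopB (pvPositions whisper_words) tts_words 0 0)

-- ===== PRECONDITION & SPEC =====
-- Pre_ excludes exactly the inputs where some whisper entry has no key "word": there Python A (and B) raise KeyError.
def Pre_align_tts_to_whisper (_tts_script : String) (whisper_words : List (List (String × String))) : Prop :=
  whisper_words.all (fun w => w.any (fun p => p.1 == "word")) = true
instance (tts_script : String) (whisper_words : List (List (String × String))) : Decidable (Pre_align_tts_to_whisper tts_script whisper_words) := by unfold Pre_align_tts_to_whisper; infer_instance

def pvWitness_align_tts_to_whisper : String × (List (List (String × String))) := ("hi there", [[("word", "HI")], [("word", "THERE")]])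

def Spec_align_tts_to_whisper (tts_script : String) (whisper_words : List (List (String × String))) (out : List String × (List (Int × Int))) : Prop := out = align_tts_to_whisper_alt tts_script whisper_words
instance (tts_script : String) (whisper_words : List (List (String × String))) (out : List String × (List (Int × Int))) : Decidable (Spec_align_tts_to_whisper tts_script whisper_words out) := by unfold Spec_align_tts_to_whisper; infer_instance

-- ===== CLAIM (what is proved, stated in full; the proofs are below) =====
def Claim_equal_align_tts_to_whisper : Prop := ∀ (tts_script : String) (whisper_words : List (List (String × String))), Dom_align_tts_to_whisper tts_script whisper_words → Pre_align_tts_to_whisper tts_script whisper_words → Spec_align_tts_to_whisper tts_script whisper_words (align_tts_to_whisper tts_script whisper_words)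

-- ===== LEMMAS AND PROOFS =====

-- the ascending list of indices (from off) at which tw occurs — the common characterisation
-- of A's scan, of B's inverted index, and of B's bisect result
def pvMatches (tw : String) : List String → Int → List Int
  | [], _ => []
  | w :: rest, off => if w == tw then off :: pvMatches tw rest (off + 1) else pvMatches tw rest (off + 1)

theorem pvMatches_bounds (tw : String) (l : List String) (off : Int) (j : Int)
    (hj : j ∈ pvMatches tw l off) : off ≤ j ∧ j < off + l.length := by
  induction l generalizing off with
  | nil => simp [pvMatches] at hj
  | cons w rest ih =>
    simp only [pvMatches] at hj
    split at hj
    · rcases List.mem_cons.mp hj with h | h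
      · subst h; simp
      · have := ih (off + 1) h; simp; omega
    · have := ih (off + 1) hj; simp; omega

theorem pvMatches_sorted (tw : String) (l : List String) (off : Int) :
    (pvMatches tw l off).Pairwise (· ≤ ·) := by
  induction l generalizing off with
  | nil => simp [pvMatches]
  | cons w rest ih =>
    simp only [pvMatches]
    split
    · refine List.Pairwise.cons ?_ (ih (off + 1))
      intro j hj
      have := pvMatches_bounds tw rest (off + 1) j hj
      omega
    · exact ih (off + 1)

theorem pvMatches_append (tw : String) (a b : List String) (off : Int) :
    pvMatches tw (a ++ b) off = pvMatches tw a off ++ pvMatches tw b (off + a.length) := by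
  induction a generalizing off with
  | nil => simp [pvMatches]
  | cons w rest ih =>
    simp only [List.cons_append, pvMatches, ih]
    split <;> simp <;> ring_nf

-- A's scan characterised by pvMatches on the dropped stream
theorem pvScanA_stop (stream : List String) (tw : String) (wi : Nat) (h : stream.length ≤ wi) :
    pvScanA stream tw wi = (wi, none) := by
  unfold pvScanA
  simp [Nat.not_lt.mpr h]

theorem pvOuterA_stop (stream : List String) (ts : List String) (ti wi : Nat)
    (h : stream.length ≤ wi) : pvOuterA stream ts ti wi = [] := by
  induction ts generalizing ti with
  | nil => rfl
  | cons tw more ih =>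
    simp only [pvOuterA, pvScanA_stop stream tw wi h]
    exact ih (ti + 1)

theorem pvScanA_char (stream : List String) (tw : String) (l : List String) (wi : Nat)
    (hd : stream.drop wi = l) :
    pvScanA stream tw wi = (match pvMatches tw l (wi : Int) with
      | [] => (wi + l.length, none)
      | j :: _ => (j.toNat + 1, some j.toNat)) := by
  induction l generalizing wi with
  | nil =>
    have hlen : stream.length ≤ wi := by
      have := congrArg List.length hd; simp at this; omega
    simp [pvMatches, pvScanA_stop stream tw wi hlen]
  | cons w rest ih =>
    have hwi : wi < stream.length := by
      have := congrArg List.length hd; simp at this; omega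
    have hhead : stream[wi] = w := by
      have h0 : stream[wi]? = some w := by
        have h1 : (stream.drop wi)[0]? = stream[wi + 0]? := List.getElem?_drop
        simp only [Nat.add_zero] at h1
        rw [← h1, hd]; simp
      simpa [List.getElem?_eq_getElem hwi] using h0
    have hd' : stream.drop (wi + 1) = rest := by
      have : (stream.drop wi).drop 1 = stream.drop (wi + 1) := by rw [List.drop_drop]
      rw [← this, hd]; simp
    by_cases hm : w == tw
    · rw [pvScanA]
      simp only [pvMatches, hm, if_pos, hwi, dif_pos, hhead]
      simp
    · have hstep : pvScanA stream tw wi = pvScanA stream tw (wi + 1) := by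
        rw [pvScanA]; simp [hwi, hhead, hm]
      rw [hstep, ih (wi + 1) hd']
      simp only [pvMatches, hm, if_neg, Bool.not_eq_true]
      have hcast : ((wi + 1 : Nat) : Int) = (wi : Int) + 1 := by push_cast; ring
      rw [hcast]
      cases pvMatches tw rest ((wi : Int) + 1) with
      | nil => simp; omega
      | cons j js => simp

-- B's inverted index characterised by pvMatches on the whole stream
theorem pvPositions_char (whisper_words : List (List (String × String))) (tw : String) :
    (pvPositions whisper_words).getD tw [] = pvMatches tw (whisper_words.map pvWordOf) 0 := by
  have hfold : pvPositions whisper_words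
      = ((PySem.List.enumerate whisper_words 0).map (fun p => (pvWordOf p.2, p.1))).foldl
          (fun d p => d.modify p.1 [] (· ++ [p.2])) PySem.Dict.empty := by
    rw [List.foldl_map]; rfl
  rw [hfold, PySem.Dict.getD_foldl_modify_append]
  rw [List.filter_map, List.map_map]
  have key : ∀ (ws : List (List (String × String))) (off : Int),
      (((PySem.List.enumerate ws off).filter (fun p => pvWordOf p.2 == tw)).map (·.1))
        = pvMatches tw (ws.map pvWordOf) off := by
    intro ws
    induction ws with
    | nil => intro off; simp [PySem.List.enumerate_nil, pvMatches]
    | cons w rest ih =>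
      intro off
      rw [PySem.List.enumerate_cons]
      simp only [List.map_cons, pvMatches, List.filter_cons]
      by_cases hm : pvWordOf w == tw
      · simp [hm, ih (off + 1)]
      · simp [hm, ih (off + 1)]
  have : ((fun x => x.2) ∘ fun p => (pvWordOf p.2, p.1)) = fun (p : Int × List (String × String)) => p.1 := rfl
  rw [show (PySem.Dict.empty : PySem.Dict String (List Int)).getD tw [] = [] from rfl]
  simpa using key whisper_words 0

-- hand-written bisect_left meets its spec on a ≤-sorted list
theorem pvBisect_spec (lst : List Int) (x : Int) (hs : lst.Pairwise (· ≤ ·)) :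
    ∀ (n lo hi : Nat), hi - lo ≤ n → lo ≤ hi → hi ≤ lst.length →
    (∀ j (hj : j < lst.length), j < lo → lst[j] < x) →
    (∀ j (hj : j < lst.length), hi ≤ j → x ≤ lst[j]) →
    (pvBisect lst x lo hi ≤ lst.length
      ∧ (∀ j (hj : j < lst.length), j < pvBisect lst x lo hi → lst[j] < x)
      ∧ (∀ j (hj : j < lst.length), pvBisect lst x lo hi ≤ j → x ≤ lst[j])) := by
  have hmono : ∀ (i j : Nat) (hi : i < lst.length) (hj : j < lst.length), i ≤ j → lst[i] ≤ lst[j] := by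
    intro i j hi hj hij
    rcases Nat.lt_or_ge i j with h | h
    · exact List.pairwise_iff_getElem.mp hs i j hi hj h
    · have : i = j := by omega
      subst this; exact le_refl _
  intro n
  induction n with
  | zero =>
    intro lo hi hfuel hlohi hhi hl hh
    have : lo = hi := by omega
    subst this
    rw [pvBisect]; simp only [lt_irrefl, dite_false]
    exact ⟨by omega, fun j hj hjlo => hl j hj hjlo, fun j hj hjlo => hh j hj hjlo⟩
  | succ n ih =>
    intro lo hi hfuel hlohi hhi hl hh
    by_cases hlt : lo < hi
    · rw [pvBisect]; simp only [hlt, dite_true]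
      have hmid1 : lo ≤ (lo + hi) / 2 := by omega
      have hmid2 : (lo + hi) / 2 < hi := by omega
      have hmlen : (lo + hi) / 2 < lst.length := by omega
      have hgetD : lst.getD ((lo + hi) / 2) 0 = lst[(lo + hi) / 2] := List.getD_eq_getElem lst 0 hmlen
      by_cases hc : lst.getD ((lo + hi) / 2) 0 < x
      · simp only [hc, if_true]
        refine ih ((lo + hi) / 2 + 1) hi (by omega) (by omega) hhi ?_ hh
        intro j hj hjlo
        rcases Nat.lt_or_ge j lo with h | h
        · exact hl j hj h
        · calc lst[j] ≤ lst[(lo + hi) / 2] := hmono j _ hj hmlen (by omega)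
            _ < x := by rw [← hgetD]; exact hc
      · simp only [hc, if_false]
        refine ih lo ((lo + hi) / 2) (by omega) (by omega) (by omega) hl ?_
        intro j hj hjhi
        calc x ≤ lst[(lo + hi) / 2] := by rw [← hgetD]; omega
          _ ≤ lst[j] := hmono _ j hmlen hj hjhi
    · rw [pvBisect]; simp only [hlt, dite_false]
      have : lo = hi := by omega
      subst this
      exact ⟨by omega, fun j hj hjlo => hl j hj hjlo, fun j hj hjlo => hh j hj hjlo⟩

-- find? p = the element at the first index where p holds
theorem pvFind_at (p : Int → Bool) (lst : List Int) :
    ∀ (k : Nat), k ≤ lst.length →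
    (∀ j (hj : j < lst.length), j < k → p lst[j] = false) →
    (∀ h : k < lst.length, p lst[k] = true) →
    lst.find? p = lst[k]? := by
  induction lst with
  | nil => intro k hk _ _; simp at hk; subst hk; simp
  | cons a l ih =>
    intro k hk hb ha
    cases k with
    | zero =>
      have := ha (by simp)
      simp at this
      simp [this]
    | succ k =>
      have h0 : p a = false := by
        have := hb 0 (by simp) (by omega)
        simpa using this
      rw [List.find?_cons, h0]
      have := ih k (by simpa using hk)
        (fun j hj hjk => by
          have := hb (j + 1) (by simpa using Nat.succ_lt_succ hj) (by omega)
          simpa using this)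
        (fun h => by
          have := ha (by simpa using Nat.succ_lt_succ h)
          simpa using this)
      rw [this]
      simp

theorem pvBisect_find (lst : List Int) (x : Int) (hs : lst.Pairwise (· ≤ ·)) :
    lst[pvBisect lst x 0 lst.length]? = lst.find? (fun j => decide (x ≤ j)) := by
  obtain ⟨hk, hb, ha⟩ := pvBisect_spec lst x hs lst.length 0 lst.length (by omega) (by omega)
    (le_refl _) (by omega) (by omega)
  rw [pvFind_at (fun j => decide (x ≤ j)) lst (pvBisect lst x 0 lst.length) hk
    (fun j hj hjk => by simpa using not_le.mpr (hb j hj hjk))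
    (fun h => by simpa using ha _ h (le_refl _))]

theorem pvFind_head (p : Int → Bool) (l : List Int) (h : ∀ j ∈ l, p j = true) :
    l.find? p = l.head? := by
  cases l with
  | nil => rfl
  | cons a rest => simp [h a (by simp)]

-- find-first-index ≥ wi over the whole match list = head of the matches of the dropped stream
theorem pvFind_split (tw : String) (stream : List String) (wi : Nat) :
    (pvMatches tw stream 0).find? (fun j => decide ((wi : Int) ≤ j))
      = (pvMatches tw (stream.drop wi) (wi : Int)).head? := by
  by_cases hw : wi ≤ stream.length
  · have hsplit : stream = stream.take wi ++ stream.drop wi := (List.take_append_drop wi stream).symm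
    have htlen : (stream.take wi).length = wi := by simp; omega
    conv_lhs => rw [hsplit]
    rw [pvMatches_append, List.find?_append]
    have h1 : (pvMatches tw (stream.take wi) 0).find? (fun j => decide ((wi : Int) ≤ j)) = none := by
      rw [List.find?_eq_none]
      intro j hj
      have := pvMatches_bounds tw _ 0 j hj
      rw [htlen] at this
      simp; omega
    rw [h1, Option.none_or, htlen]
    rw [pvFind_head]
    · norm_num
    · intro j hj
      have := pvMatches_bounds tw _ _ j hj
      simp; omega
  · have hdrop : stream.drop wi = [] := List.drop_eq_nil_of_le (by omega)
    rw [hdrop]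
    simp only [pvMatches, List.head?_nil]
    rw [List.find?_eq_none]
    intro j hj
    have := pvMatches_bounds tw stream 0 j hj
    simp; omega

-- main loop equivalence
theorem pvMain (whisper_words : List (List (String × String))) (tsuf : List String) (ti wi : Nat) :
    pvOuterA (whisper_words.map pvWordOf) tsuf ti wi
      = pvLoopB (pvPositions whisper_words) tsuf (ti : Int) (wi : Int) := by
  induction tsuf generalizing ti wi with
  | nil => rfl
  | cons tw more ih =>
    set stream := whisper_words.map pvWordOf with hstream
    have hlst : (pvPositions whisper_words).getD tw [] = pvMatches tw stream 0 :=
      pvPositions_char whisper_words tw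
    have hscan := pvScanA_char stream tw (stream.drop wi) wi rfl
    have hbf : (pvMatches tw stream 0)[pvBisect (pvMatches tw stream 0) (wi : Int) 0
        (pvMatches tw stream 0).length]? = (pvMatches tw (stream.drop wi) (wi : Int)).head? := by
      rw [pvBisect_find _ _ (pvMatches_sorted tw stream 0), pvFind_split]
    simp only [pvLoopB, hlst]
    cases hmat : pvMatches tw (stream.drop wi) (wi : Int) with
    | nil =>
      rw [hmat] at hscan hbf
      simp only [List.head?_nil] at hbf
      rw [hbf]
      simp only [pvOuterA, hscan]
      have hlen : stream.length ≤ wi + (stream.drop wi).length := by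
        simp; omega
      exact pvOuterA_stop stream more (ti + 1) _ hlen
    | cons j js =>
      rw [hmat] at hscan hbf
      simp only [List.head?_cons] at hbf
      rw [hbf]
      have hj0 : (wi : Int) ≤ j := (pvMatches_bounds tw _ _ j (hmat ▸ List.mem_cons_self)).1
      have hjt : ((j.toNat : Nat) : Int) = j := Int.toNat_of_nonneg (by omega)
      simp only [pvOuterA, hscan]
      rw [ih (ti + 1) (j.toNat + 1)]
      push_cast [hjt]
      rfl

-- ===== VERDICT (by name: the statement is the Claim_ definition above) =====
theorem align_tts_to_whisper_spec : Claim_equal_align_tts_to_whisper := by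
  intro tts_script whisper_words _ _
  unfold Spec_align_tts_to_whisper align_tts_to_whisper align_tts_to_whisper_alt
  exact congrArg _ (pvMain whisper_words (pvTokenize tts_script) 0 0)
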